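-- pv_equiv track=rewrite | github.com/afterssafy6/afterssafy6 | 8주차/PG_64063_호텔_방_배정/PG_64063_호텔_방_배정.py | solution
-- ===== SOURCE A (Python) =====
-- def solution(k, room_number):
--     answer = []
--     parent = {} # 다음 방값으로 계속 연결
--
--     def find(x):
--         if x not in parent:
--             parent[x]=x+1
--             return x
--
--         parent[x]=find(parent[x])+1
--         return parent[x]-1
--
--     for num in room_number:
--         empty=find(num)
--         answer.append(empty)
--
--     return answer
-- ===== SOURCE B (Python) =====
-- def solution(k, room_number):
--     answer = []
--     used = set()
--     for num in room_number:
--         e = num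
--         while e in used:
--             e += 1
--         used.add(e)
--         answer.append(e)
--     return answer
-- ===== Notes on version B (the rewrite author's own statement) =====
-- stated objective: simpler
-- what changed: A's union-find parent dict with a recursive path-compressing find is replaced by a plain set of occupied rooms and linear probing (increment e until it is free); correct because A's find returns exactly the smallest unoccupied room >= num.
import Mathlib
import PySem

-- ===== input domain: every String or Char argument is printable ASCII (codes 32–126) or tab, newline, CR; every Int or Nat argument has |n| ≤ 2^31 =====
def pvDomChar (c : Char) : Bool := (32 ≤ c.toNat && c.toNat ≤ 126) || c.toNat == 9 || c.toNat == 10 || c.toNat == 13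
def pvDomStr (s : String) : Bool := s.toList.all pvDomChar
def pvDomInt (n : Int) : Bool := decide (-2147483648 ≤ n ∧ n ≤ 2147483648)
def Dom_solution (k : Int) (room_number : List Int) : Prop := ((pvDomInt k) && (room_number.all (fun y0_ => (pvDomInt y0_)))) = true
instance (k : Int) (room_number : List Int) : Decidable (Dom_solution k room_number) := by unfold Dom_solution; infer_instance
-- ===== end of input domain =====

-- B drops A's union-find parent dict entirely: it keeps a set of occupied rooms and probes
-- e, e+1, e+2, … until a free room is found (objective: simpler; same return value, because
-- A's find returns exactly the smallest unoccupied room ≥ num).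

-- ===== PORT A =====
-- A's recursive find; the recursion is not structural, so it carries a fuel parameter
-- (one unit per recursive call).  solution calls it with fuel room_number.length + 1,
-- which always suffices on real runs: each find adds exactly one key to the dict and the
-- pointer chain strictly increases through keys, so a chain visits at most (dict size)
-- keys before the empty room.  The chain pointers are exactly Python's parent dict.
def findA : Nat → PySem.Dict Int Int → Int → Int × PySem.Dict Int Int
  | 0, d, x => (x, d.insert x (x + 1))
  | fuel + 1, d, x =>
    match d.get? x with
    | none => (x, d.insert x (x + 1))          -- parent[x] = x+1; return x
    | some p =>
      let rd := findA fuel d p                 -- parent[x] = find(parent[x]) + 1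
      (rd.1, rd.2.insert x (rd.1 + 1))         -- return parent[x] - 1

def solution (k : Int) (room_number : List Int) : List Int :=
  (room_number.foldl
    (fun st num =>
      let ed := findA (room_number.length + 1) st.2 num
      (st.1 ++ [ed.1], ed.2))
    (([] : List Int), (PySem.Dict.empty : PySem.Dict Int Int))).1

-- ===== PORT B =====
-- termination measure for B's probing while-loop (cited by probe's decreasing_by):
-- stepping past an occupied room strictly shrinks the number of occupied rooms ≥ e.
theorem pv_filter_lt {S : List Int} {x p : Int} (hx : x ∈ S) (hxp : x < p) :
    (S.filter (fun y => decide (p ≤ y))).length < (S.filter (fun y => decide (x ≤ y))).length := by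
  induction S with
  | nil => cases hx
  | cons a t ih =>
    rcases List.mem_cons.mp hx with rfl | ha
    · have h1 : (t.filter (fun y => decide (p ≤ y))).length ≤ (t.filter (fun y => decide (x ≤ y))).length := by
        apply List.Sublist.length_le
        apply List.monotone_filter_right
        intro y hy
        simp only [decide_eq_true_eq] at hy ⊢
        omega
      have hpx : ¬ (p ≤ x) := by omega
      simp only [List.filter_cons]
      simp [hpx]
      omega
    · have := ih ha
      simp only [List.filter_cons]
      by_cases h1 : p ≤ a
      · have h2 : x ≤ a := by omega
        simp [h1, h2]; omega
      · by_cases h2 : x ≤ a <;> simp [h1, h2] <;> omega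

-- B's while loop: e += 1 while e is occupied
def probe (used : List Int) (e : Int) : Int :=
  if h : e ∈ used then probe used (e + 1) else e
termination_by (used.filter (fun y => decide (e ≤ y))).length
decreasing_by exact pv_filter_lt h (by omega)

def solution_alt (k : Int) (room_number : List Int) : List Int :=
  (room_number.foldl
    (fun st num =>
      let e := probe st.2 num
      (st.1 ++ [e], PySem.Set.add st.2 e))
    (([] : List Int), (PySem.Set.empty : PySem.Set Int))).1

-- ===== PRECONDITION & SPEC =====
def Spec_solution (k : Int) (room_number : List Int) (out : List Int) : Prop := out = solution_alt k room_number
instance (k : Int) (room_number : List Int) (out : List Int) : Decidable (Spec_solution k room_number out) := by unfold Spec_solution; infer_instance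

-- ===== CLAIM (what is proved, stated in full; the proofs are below) =====
def Claim_equal_solution : Prop := ∀ (k : Int) (room_number : List Int), Dom_solution k room_number → Spec_solution k room_number (solution k room_number)

-- ===== LEMMAS AND PROOFS =====

-- probe used e is the smallest free room ≥ e: it is ≥ e, free, and everything between is occupied
theorem probe_ge (used : List Int) (e : Int) : e ≤ probe used e := by
  induction e using probe.induct used with
  | case1 e h ih => rw [probe, dif_pos h]; omega
  | case2 e h => rw [probe, dif_neg h]

theorem probe_mem_of_lt (used : List Int) (e : Int) :
    ∀ y, e ≤ y → y < probe used e → y ∈ used := by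
  induction e using probe.induct used with
  | case1 e h ih =>
    intro y h1 h2
    rw [probe, dif_pos h] at h2
    by_cases hy : y = e
    · exact hy ▸ h
    · exact ih y (by omega) h2
  | case2 e h =>
    intro y h1 h2
    rw [probe, dif_neg h] at h2; omega

theorem probe_congr (used : List Int) (e p : Int) (hep : e ≤ p)
    (h : ∀ y, e ≤ y → y < p → y ∈ used) : probe used e = probe used p := by
  have key : ∀ n : Nat, ∀ e : Int, p - e = n → e ≤ p → (∀ y, e ≤ y → y < p → y ∈ used) → probe used e = probe used p := by
    intro n
    induction n with
    | zero =>
      intro e h0 _ _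
      have he : e = p := by omega
      rw [he]
    | succ m ih =>
      intro e h0 h1 h2
      have he : e ∈ used := h2 e le_rfl (by omega)
      rw [probe, dif_pos he]
      exact ih (e+1) (by omega) (by omega) (fun y hy1 hy2 => h2 y (by omega) hy2)
  exact key (p - e).toNat e (by omega) hep h

-- the dict invariant A maintains: every pointer points strictly up,
-- and every room in [x, parent[x]) is itself a key (occupied)
def InvD (d : PySem.Dict Int Int) : Prop :=
  ∀ x v, d.get? x = some v → x < v ∧ ∀ y, x ≤ y → y < v → ((d.get? y).isSome = true)

-- main lemma: under the invariant, with keys(d) = S (as a membership predicate) and enough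
-- fuel, A's find returns B's probe, preserves the invariant, and adds exactly that key
theorem findA_probe : ∀ (fuel : Nat) (d : PySem.Dict Int Int) (x : Int) (S : List Int),
    InvD d →
    (∀ j, (d.get? j).isSome = decide (j ∈ S)) →
    (S.filter (fun y => decide (x ≤ y))).length < fuel →
    (findA fuel d x).1 = probe S x ∧
    InvD (findA fuel d x).2 ∧
    (∀ j, ((findA fuel d x).2.get? j).isSome = decide (j ∈ probe S x :: S)) := by
  intro fuel
  induction fuel with
  | zero =>
    intro d x S _ _ hf
    exact absurd hf (Nat.not_lt_zero _)
  | succ n ih =>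
    intro d x S hInv hkeys hf
    cases hg : d.get? x with
    | none =>
      -- x is free: probe S x = x
      have hxS : x ∉ S := by
        have := hkeys x
        rw [hg] at this
        simpa using this.symm
      have hpx : probe S x = x := by rw [probe, dif_neg hxS]
      refine ⟨?_, ?_, ?_⟩
      · simp [findA, hg, hpx]
      · simp only [findA, hg]
        intro a v hav
        by_cases hax : a = x
        · subst hax
          rw [PySem.Dict.get?_insert_self] at hav
          have hv : v = a + 1 := by injection hav with h'; omega
          subst hv
          refine ⟨by omega, fun y h1 h2 => ?_⟩
          have : y = a := by omega
          subst this
          simp [PySem.Dict.get?_insert_self]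
        · rw [PySem.Dict.get?_insert_of_ne _ _ hax] at hav
          obtain ⟨h1, h2⟩ := hInv a v hav
          refine ⟨h1, fun y hy1 hy2 => ?_⟩
          by_cases hyx : y = x
          · subst hyx; simp [PySem.Dict.get?_insert_self]
          · rw [PySem.Dict.get?_insert_of_ne _ _ hyx]; exact h2 y hy1 hy2
      · intro j
        simp only [findA, hg, hpx]
        by_cases hjx : j = x
        · subst hjx; simp [PySem.Dict.get?_insert_self]
        · rw [PySem.Dict.get?_insert_of_ne _ _ hjx, hkeys j]
          simp [hjx]
    | some p =>
      have hxp : x < p := (hInv x p hg).1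
      have hint : ∀ y, x ≤ y → y < p → y ∈ S := by
        intro y h1 h2
        have := (hInv x p hg).2 y h1 h2
        rw [hkeys y] at this
        simpa using this
      have hxS : x ∈ S := hint x le_rfl hxp
      have hfp : (S.filter (fun y => decide (p ≤ y))).length < n := by
        have := pv_filter_lt hxS hxp
        omega
      obtain ⟨ih1, ih2, ih3⟩ := ih d p S hInv hkeys hfp
      have hpxp : probe S x = probe S p := probe_congr S x p (by omega) hint
      have hge : p ≤ probe S p := probe_ge S p
      refine ⟨?_, ?_, ?_⟩
      · simp only [findA, hg, hpxp]; exact ih1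
      · simp only [findA, hg]
        intro a v hav
        by_cases hax : a = x
        · subst hax
          rw [PySem.Dict.get?_insert_self] at hav
          have hv : v = (findA n d p).1 + 1 := by injection hav with h'; omega
          subst hv
          rw [ih1]
          constructor
          · omega
          · intro y hy1 hy2
            by_cases hya : y = a
            · subst hya; simp [PySem.Dict.get?_insert_self]
            · rw [PySem.Dict.get?_insert_of_ne _ _ hya, ih3 y]
              by_cases hyp : y < p
              · simp [hint y hy1 hyp]
              · by_cases hye : y = probe S p
                · simp [hye]
                · have : y ∈ S := probe_mem_of_lt S p y (by omega) (by omega)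
                  simp [this]
        · rw [PySem.Dict.get?_insert_of_ne _ _ hax] at hav
          obtain ⟨h1, h2⟩ := ih2 a v hav
          refine ⟨h1, fun y hy1 hy2 => ?_⟩
          by_cases hyx : y = x
          · subst hyx; simp [PySem.Dict.get?_insert_self]
          · rw [PySem.Dict.get?_insert_of_ne _ _ hyx]; exact h2 y hy1 hy2
      · intro j
        simp only [findA, hg, hpxp]
        by_cases hjx : j = x
        · subst hjx
          simp [PySem.Dict.get?_insert_self, hxS]
        · rw [PySem.Dict.get?_insert_of_ne _ _ hjx, ih3 j]

theorem pv_len_add (S : List Int) (e : Int) : (PySem.Set.add S e).length ≤ S.length + 1 := by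
  simp only [PySem.Set.add]
  split <;> simp

-- the two outer loops stay in lockstep: same answers, keys(d) = B's used set
theorem fold_eq : ∀ (L ans : List Int) (d : PySem.Dict Int Int) (S : List Int) (N : Nat),
    InvD d → (∀ j, (d.get? j).isSome = decide (j ∈ S)) →
    S.length + L.length ≤ N →
    (L.foldl (fun st num => let ed := findA (N+1) st.2 num; (st.1 ++ [ed.1], ed.2)) (ans, d)).1
      = (L.foldl (fun st num => let e := probe st.2 num; (st.1 ++ [e], PySem.Set.add st.2 e)) (ans, S)).1 := by
  intro L
  induction L with
  | nil => intro ans d S N _ _ _; rfl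
  | cons a t ih =>
    intro ans d S N hInv hkeys hlen
    have hf : (S.filter (fun y => decide (a ≤ y))).length < N + 1 := by
      have h1 := List.length_filter_le (fun y => decide (a ≤ y)) S
      simp only [List.length_cons] at hlen
      omega
    obtain ⟨h1, h2, h3⟩ := findA_probe (N+1) d a S hInv hkeys hf
    simp only [List.foldl_cons]
    rw [h1]
    apply ih
    · exact h2
    · intro j
      rw [h3 j]
      have : j ∈ probe S a :: S ↔ j ∈ PySem.Set.add S (probe S a) := by
        rw [PySem.Set.mem_add]
        simp [or_comm]
      simp only [this]
    · have := pv_len_add S (probe S a)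
      simp only [List.length_cons] at hlen
      omega

-- ===== VERDICT (by name: the statement is the Claim_ definition above) =====
theorem solution_spec : Claim_equal_solution := by
  intro k room_number _
  show solution k room_number = solution_alt k room_number
  simp only [solution, solution_alt]
  exact fold_eq room_number [] PySem.Dict.empty [] room_number.length
    (by intro x v h; simp [PySem.Dict.get?, PySem.Dict.empty] at h)
    (by intro j; simp [PySem.Dict.get?, PySem.Dict.empty])
    (by simp)
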